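-- pv_equiv track=rewrite | github.com/melbournebioinformatics/COMP90014 | data/2023/Assignment_2/utils/clustering.py | kmer_dist
-- ===== SOURCE A (Python) =====
-- from typing import Optional
-- from collections import Counter
--
-- def kmer_dist(seq1: str, seq2: str, k: int) -> Optional[int]:
--     if len(seq1) < k or len(seq2) < k:
--         return None
--
--     kmers1 = []
--     for i in range(len(seq1) - k + 1):
--         kmers1.append(seq1[i:i+k])
--
--     kmers2 = []
--     for i in range(len(seq2) - k + 1):
--         kmers2.append(seq2[i:i+k])
--
--     all_kmers = set(kmers1 + kmers2)
--     counts1 = Counter(kmers1)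
--     counts2 = Counter(kmers2)
--
--     dist = 0
--     for kmer in all_kmers:
--         dist += abs(counts1[kmer] - counts2[kmer])
--     return dist
-- ===== SOURCE B (Python) =====
-- from typing import Optional
--
--
-- def kmer_dist(seq1: str, seq2: str, k: int) -> Optional[int]:
--     # Sort both k-mer lists, then cancel matches with a two-pointer merge:
--     # every unmatched k-mer contributes 1 to the L1 distance. No counts are built.
--     if len(seq1) < k or len(seq2) < k:
--         return None
--     a = sorted(seq1[i:i+k] for i in range(len(seq1) - k + 1))
--     b = sorted(seq2[i:i+k] for i in range(len(seq2) - k + 1))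
--     i = j = dist = 0
--     while i < len(a) and j < len(b):
--         if a[i] == b[j]:
--             i += 1
--             j += 1
--         elif a[i] < b[j]:
--             dist += 1
--             i += 1
--         else:
--             dist += 1
--             j += 1
--     return dist + (len(a) - i) + (len(b) - j)
-- ===== Notes on version B (the rewrite author's own statement) =====
-- stated objective: alternative
-- what changed: Replaces counting (two Counters plus a union set summed by absolute difference) with sort-and-cancel: both k-mer lists are sorted and a two-pointer merge cancels equal k-mers, each unmatched k-mer contributing 1 to the distance; no counts or sets are ever built.
import Mathlib
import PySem

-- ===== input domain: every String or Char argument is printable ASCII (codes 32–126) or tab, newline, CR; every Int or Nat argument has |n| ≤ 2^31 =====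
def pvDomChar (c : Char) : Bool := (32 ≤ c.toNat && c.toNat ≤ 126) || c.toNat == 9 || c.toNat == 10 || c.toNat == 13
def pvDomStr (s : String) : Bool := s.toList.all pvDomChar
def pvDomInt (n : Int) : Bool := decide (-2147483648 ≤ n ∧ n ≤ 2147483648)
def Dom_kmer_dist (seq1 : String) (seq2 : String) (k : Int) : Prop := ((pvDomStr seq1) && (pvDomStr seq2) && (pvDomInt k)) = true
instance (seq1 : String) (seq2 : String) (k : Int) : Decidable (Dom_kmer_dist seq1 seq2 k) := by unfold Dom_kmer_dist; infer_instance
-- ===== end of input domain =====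

-- B computes the same L1 k-mer distance by sorting both k-mer lists and cancelling equal
-- k-mers in a two-pointer merge, instead of two Counters plus a union set.


-- ===== PORT A =====
def kmer_dist (seq1 : String) (seq2 : String) (k : Int) : Option Int :=
  if (PySem.Str.len seq1 : Int) < k ∨ (PySem.Str.len seq2 : Int) < k then none
  else
    let kmers1 := (PySem.List.pyRange 0 ((PySem.Str.len seq1 : Int) - k + 1) 1).foldl
      (fun acc i => acc ++ [PySem.Str.slice seq1 (some i) (some (i + k))]) []
    let kmers2 := (PySem.List.pyRange 0 ((PySem.Str.len seq2 : Int) - k + 1) 1).foldl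
      (fun acc i => acc ++ [PySem.Str.slice seq2 (some i) (some (i + k))]) []
    let all_kmers := PySem.Set.ofList (kmers1 ++ kmers2)
    let counts1 := PySem.Dict.counter kmers1
    let counts2 := PySem.Dict.counter kmers2
    let dist := all_kmers.foldl (fun dist kmer => dist + |counts1.getD kmer 0 - counts2.getD kmer 0|) 0
    some dist

-- ===== PORT B =====
-- B-side helper: the while loop of Source B (two pointers into the sorted lists = the two suffixes)
def pvMergeLoop (dist : Int) (a b : List String) : Int :=
  match a, b with
  | x :: a', y :: b' =>
    if x == y then pvMergeLoop dist a' b'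
    else if x < y then pvMergeLoop (dist + 1) a' (y :: b')
    else pvMergeLoop (dist + 1) (x :: a') b'
  | a, b => dist + (a.length : Int) + (b.length : Int)
termination_by a.length + b.length
decreasing_by all_goals (simp only [List.length_cons]; omega)

def kmer_dist_alt (seq1 : String) (seq2 : String) (k : Int) : Option Int :=
  if (PySem.Str.len seq1 : Int) < k ∨ (PySem.Str.len seq2 : Int) < k then none
  else
    -- Python's sorted(...) ported as the library merge sort (equal result on a linear order)
    let a := ((PySem.List.pyRange 0 ((PySem.Str.len seq1 : Int) - k + 1) 1).map
      (fun i => PySem.Str.slice seq1 (some i) (some (i + k)))).mergeSort (fun x y => x ≤ y)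
    let b := ((PySem.List.pyRange 0 ((PySem.Str.len seq2 : Int) - k + 1) 1).map
      (fun i => PySem.Str.slice seq2 (some i) (some (i + k)))).mergeSort (fun x y => x ≤ y)
    some (pvMergeLoop 0 a b)

-- ===== PRECONDITION & SPEC =====
def Spec_kmer_dist (seq1 : String) (seq2 : String) (k : Int) (out : Option Int) : Prop := out = kmer_dist_alt seq1 seq2 k
instance (seq1 : String) (seq2 : String) (k : Int) (out : Option Int) : Decidable (Spec_kmer_dist seq1 seq2 k out) := by unfold Spec_kmer_dist; infer_instance

-- ===== CLAIM =====
def Claim_equal_kmer_dist : Prop := ∀ (seq1 : String) (seq2 : String) (k : Int), Dom_kmer_dist seq1 seq2 k → Spec_kmer_dist seq1 seq2 k (kmer_dist seq1 seq2 k)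

-- ===== LEMMAS AND PROOFS =====

-- Number of pairs cancelled by B's loop: for each element of l1 in turn, one matching
-- element of the evolving l2 is consumed (= the size of the multiset intersection).
def pvInter (l1 l2 : List String) : Int :=
  match l1 with
  | [] => 0
  | a :: t => if l2.contains a then 1 + pvInter t (l2.erase a) else pvInter t l2

theorem pv_inter_nil (l : List String) : pvInter l [] = 0 := by
  induction l with
  | nil => rfl
  | cons a t ih => simp [pvInter, ih]

theorem pv_inter_cons_right_not_mem (l1 : List String) (b : String) (t2 : List String)
    (hb : b ∉ l1) : pvInter l1 (b :: t2) = pvInter l1 t2 := by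
  induction l1 generalizing t2 with
  | nil => rfl
  | cons x t ih =>
    have hxb : x ≠ b := fun he => hb (he ▸ List.mem_cons_self)
    have hbt : b ∉ t := fun hm => hb (List.mem_cons_of_mem _ hm)
    have he : (b :: t2).erase x = b :: t2.erase x :=
      List.erase_cons_tail (by simp; exact fun h => hxb h.symm)
    simp only [pvInter, List.contains_cons, beq_eq_false_iff_ne.mpr hxb, Bool.false_or, he]
    by_cases h : t2.contains x
    · rw [if_pos h, if_pos h, ih _ hbt]
    · rw [if_neg (by simpa using h), if_neg (by simpa using h), ih _ hbt]

-- the two-pointer merge on sorted lists cancels exactly the multiset intersection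
theorem pv_merge (n : Nat) : ∀ (d : Int) (a b : List String), a.length + b.length ≤ n →
    a.Pairwise (· ≤ ·) → b.Pairwise (· ≤ ·) →
    pvMergeLoop d a b = d + a.length + b.length - 2 * pvInter a b := by
  induction n with
  | zero =>
    intro d a b hn _ _
    have ha : a = [] := List.eq_nil_of_length_eq_zero (by omega)
    have hb : b = [] := List.eq_nil_of_length_eq_zero (by omega)
    subst ha; subst hb
    simp [pvMergeLoop, pvInter]
  | succ n ih =>
    intro d a b hn hsa hsb
    match a, b with
    | [], b => simp [pvMergeLoop, pvInter]
    | x :: a', [] => simp [pvMergeLoop, pv_inter_nil]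
    | x :: a', y :: b' =>
      rw [List.pairwise_cons] at hsa hsb
      simp only [List.length_cons] at hn
      by_cases hxy : x = y
      · subst hxy
        rw [pvMergeLoop]
        simp only [BEq.rfl, if_pos]
        rw [ih d a' b' (by omega) hsa.2 hsb.2]
        simp only [pvInter, List.contains_cons, BEq.rfl, Bool.true_or, if_pos,
          List.erase_cons_head, List.length_cons]
        push_cast; ring
      · rw [pvMergeLoop]
        simp only [beq_eq_false_iff_ne.mpr hxy, Bool.false_eq_true, if_false]
        by_cases hlt : x < y
        · rw [if_pos hlt, ih (d + 1) a' (y :: b')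
              (by simp only [List.length_cons]; omega) hsa.2 (List.pairwise_cons.mpr hsb)]
          have hx : (y :: b').contains x = false := by
            simp only [List.contains_eq_mem, decide_eq_false_iff_not, List.mem_cons]
            rintro (rfl | hm)
            · exact hxy rfl
            · exact absurd hlt (not_lt.mpr (hsb.1 x hm))
          simp only [pvInter, hx, Bool.false_eq_true, if_false, List.length_cons]
          push_cast; ring
        · rw [if_neg hlt, ih (d + 1) (x :: a') b'
              (by simp only [List.length_cons]; omega) (List.pairwise_cons.mpr hsa) hsb.2]
          have hyx : y < x := lt_of_le_of_ne (not_lt.mp hlt) (fun he => hxy he.symm)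
          have hy : y ∉ x :: a' := by
            intro hm
            rcases List.mem_cons.mp hm with rfl | hm'
            · exact hxy rfl
            · exact absurd hyx (not_lt.mpr (hsa.1 y hm'))
          rw [pv_inter_cons_right_not_mem _ _ _ hy]
          simp only [List.length_cons]
          push_cast; ring

-- sums change by (f a - g a) when f and g agree everywhere on nodup S except at a ∈ S
theorem pv_sum_update (S : List String) (hS : S.Nodup) (a : String) (ha : a ∈ S)
    (f g : String → Int) (h1 : ∀ x ∈ S, x ≠ a → f x = g x) :
    (S.map f).sum = (S.map g).sum + (f a - g a) := by
  induction S with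
  | nil => cases ha
  | cons b t ih =>
    rw [List.nodup_cons] at hS
    by_cases hb : b = a
    · subst hb
      have : t.map f = t.map g := List.map_congr_left (fun x hx =>
        h1 x (List.mem_cons_of_mem _ hx) (fun he => hS.1 (he ▸ hx)))
      simp [this]; ring
    · have hat : a ∈ t := (List.mem_cons.mp ha).resolve_left (fun he => hb he.symm)
      have := ih hS.2 hat (fun x hx hxa => h1 x (List.mem_cons_of_mem _ hx) hxa)
      simp only [List.map_cons, List.sum_cons, this,
        h1 b (List.mem_cons_self) hb]
      ring

theorem pv_sum_count (l S : List String) (hS : S.Nodup) (hsub : ∀ x ∈ l, x ∈ S) :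
    (S.map (fun x => (l.count x : Int))).sum = l.length := by
  induction l with
  | nil => simp
  | cons a t ih =>
    have ha : a ∈ S := hsub a List.mem_cons_self
    have h1 : ∀ x ∈ S, x ≠ a → ((a :: t).count x : Int) = (t.count x : Int) := by
      intro x _ hx
      simp [List.count_cons, Ne.symm hx]
    rw [pv_sum_update S hS a ha _ _ h1,
      ih (fun x hx => hsub x (List.mem_cons_of_mem _ hx))]
    simp [List.count_cons]

theorem pv_sum_min (l1 l2 S : List String) (hS : S.Nodup)
    (h1 : ∀ x ∈ l1, x ∈ S) (h2 : ∀ x ∈ l2, x ∈ S) :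
    (S.map (fun x => min (l1.count x : Int) (l2.count x))).sum = pvInter l1 l2 := by
  induction l1 generalizing l2 with
  | nil => simp [pvInter]
  | cons a t ih =>
    have haS : a ∈ S := h1 a List.mem_cons_self
    have ht : ∀ x ∈ t, x ∈ S := fun x hx => h1 x (List.mem_cons_of_mem _ hx)
    by_cases hmem : a ∈ l2
    · have hc : l2.contains a := by simpa using hmem
      have hpos : 1 ≤ l2.count a := List.count_pos_iff.mpr hmem
      have hstep : ∀ x ∈ S, x ≠ a →
          min (((a :: t).count x : Int)) (l2.count x)
            = min ((t.count x : Int)) ((l2.erase a).count x) := by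
        intro x _ hx
        rw [List.count_erase_of_ne hx]
        simp [List.count_cons, Ne.symm hx]
      rw [pv_sum_update S hS a haS _ _ hstep,
        ih (l2.erase a) ht (fun x hx => h2 x (List.mem_of_mem_erase hx))]
      have hca : ((l2.erase a).count a : Int) = (l2.count a : Int) - 1 := by
        rw [List.count_erase_self]; push_cast [Nat.cast_sub hpos]; ring
      simp only [pvInter, hc, if_pos, List.count_cons_self, hca]
      have hc1 : (0:Int) ≤ (t.count a : Int) := Int.natCast_nonneg _
      have hc2 : (1:Int) ≤ (l2.count a : Int) := by exact_mod_cast hpos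
      push_cast
      omega
    · have hz : l2.count a = 0 := List.count_eq_zero.mpr hmem
      have : S.map (fun x => min (((a :: t).count x : Int)) (l2.count x))
          = S.map (fun x => min ((t.count x : Int)) (l2.count x)) := by
        apply List.map_congr_left
        intro x _
        by_cases hx : x = a
        · subst hx
          rw [List.count_cons_self, hz]
          have : (0:Int) ≤ (t.count x : Int) := Int.natCast_nonneg _
          push_cast; omega
        · simp [List.count_cons, Ne.symm hx]
      rw [this, ih l2 ht h2]
      simp [pvInter, hmem]

theorem pv_sum_abs (l1 l2 S : List String) :
    (S.map (fun x => |(l1.count x : Int) - (l2.count x : Int)|)).sum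
      = (S.map (fun x => (l1.count x : Int))).sum + (S.map (fun x => (l2.count x : Int))).sum
        - 2 * (S.map (fun x => min (l1.count x : Int) (l2.count x))).sum := by
  induction S with
  | nil => simp
  | cons a t ih =>
    have hpt : |(l1.count a : Int) - (l2.count a : Int)|
        = (l1.count a : Int) + (l2.count a : Int)
          - 2 * min (l1.count a : Int) (l2.count a : Int) := by
      rcases le_total ((l1.count a : Int)) ((l2.count a : Int)) with h | h
      · rw [abs_of_nonpos (by omega), min_eq_left h]; ring
      · rw [abs_of_nonneg (by omega), min_eq_right h]; ring
    simp only [List.map_cons, List.sum_cons, ih, hpt]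
    ring

theorem kmer_dist_main (seq1 seq2 : String) (k : Int) :
    kmer_dist seq1 seq2 k = kmer_dist_alt seq1 seq2 k := by
  rw [kmer_dist, kmer_dist_alt]
  by_cases hg : (PySem.Str.len seq1 : Int) < k ∨ (PySem.Str.len seq2 : Int) < k
  · rw [if_pos hg, if_pos hg]
  · rw [if_neg hg, if_neg hg]
    dsimp only
    set L1 := (PySem.List.pyRange 0 ((PySem.Str.len seq1 : Int) - k + 1) 1).map
      (fun i => PySem.Str.slice seq1 (some i) (some (i + k))) with hL1
    set L2 := (PySem.List.pyRange 0 ((PySem.Str.len seq2 : Int) - k + 1) 1).map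
      (fun i => PySem.Str.slice seq2 (some i) (some (i + k))) with hL2
    have eA1 : (PySem.List.pyRange 0 ((PySem.Str.len seq1 : Int) - k + 1) 1).foldl
        (fun acc i => acc ++ [PySem.Str.slice seq1 (some i) (some (i + k))]) [] = L1 := by
      simpa using PySem.List.foldl_append_singleton_eq_map
        (fun i => PySem.Str.slice seq1 (some i) (some (i + k)))
        (PySem.List.pyRange 0 ((PySem.Str.len seq1 : Int) - k + 1) 1) []
    have eA2 : (PySem.List.pyRange 0 ((PySem.Str.len seq2 : Int) - k + 1) 1).foldl
        (fun acc i => acc ++ [PySem.Str.slice seq2 (some i) (some (i + k))]) [] = L2 := by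
      simpa using PySem.List.foldl_append_singleton_eq_map
        (fun i => PySem.Str.slice seq2 (some i) (some (i + k)))
        (PySem.List.pyRange 0 ((PySem.Str.len seq2 : Int) - k + 1) 1) []
    rw [eA1, eA2]
    set A1 := L1.mergeSort (fun x y => x ≤ y) with hA1
    set A2 := L2.mergeSort (fun x y => x ≤ y) with hA2
    have hp1 : A1.Perm L1 := List.mergeSort_perm L1 _
    have hp2 : A2.Perm L2 := List.mergeSort_perm L2 _
    -- B side: the merge of the two sorted lists
    have htr : ∀ a b c : String, decide (a ≤ b) = true → decide (b ≤ c) = true →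
        decide (a ≤ c) = true := by
      intro a b c h1 h2
      rw [decide_eq_true_eq] at *
      exact le_trans h1 h2
    have hto : ∀ a b : String, (decide (a ≤ b) || decide (b ≤ a)) = true := by
      intro a b
      rcases le_total a b with h | h <;> simp [h]
    have hs1 : A1.Pairwise (· ≤ ·) :=
      (List.sorted_mergeSort htr hto L1).imp (fun h => of_decide_eq_true h)
    have hs2 : A2.Pairwise (· ≤ ·) :=
      (List.sorted_mergeSort htr hto L2).imp (fun h => of_decide_eq_true h)
    rw [pv_merge (A1.length + A2.length) 0 A1 A2 le_rfl hs1 hs2]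
    -- A side: counters → counts, fold → sum, counts are permutation-invariant
    set S := PySem.Set.ofList (L1 ++ L2) with hSdef
    have eC : S.foldl (fun dist kmer =>
          dist + |(PySem.Dict.counter L1).getD kmer 0 - (PySem.Dict.counter L2).getD kmer 0|) 0
        = (S.map (fun x => |(A1.count x : Int) - (A2.count x : Int)|)).sum := by
      rw [PySem.List.foldl_add]
      simp [PySem.Dict.getD_counter, hp1.count_eq, hp2.count_eq]
    rw [eC, pv_sum_abs]
    have hS : S.Nodup := PySem.Set.nodup_ofList _
    have hm1 : ∀ x ∈ A1, x ∈ S := fun x hx => by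
      rw [hSdef, PySem.Set.mem_ofList]; exact List.mem_append_left _ (hp1.mem_iff.mp hx)
    have hm2 : ∀ x ∈ A2, x ∈ S := fun x hx => by
      rw [hSdef, PySem.Set.mem_ofList]; exact List.mem_append_right _ (hp2.mem_iff.mp hx)
    rw [pv_sum_count A1 S hS hm1, pv_sum_count A2 S hS hm2, pv_sum_min A1 A2 S hS hm1 hm2]
    ring

-- ===== VERDICT =====
theorem kmer_dist_spec : Claim_equal_kmer_dist := by
  intro seq1 seq2 k _
  unfold Spec_kmer_dist
  exact kmer_dist_main seq1 seq2 k
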